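-- pv_equiv track=rewrite | github.com/Aman6744/project_backup | src/Preprocess_image.py | preprocess_label
-- ===== SOURCE A (Python) =====
-- def preprocess_label(text, maxTextLength):
--     cost = 0
--     for i in range(len(text)):
--         if i != 0 and text[i] == text[i-1]:
--             cost += 2
--         else:
--             cost += 1
--
--         if cost > maxTextLength:
--             return (False, text[:i])
--
--     return (True, text)
-- ===== SOURCE B (Python) =====
-- from itertools import groupby
--
-- def preprocess_label(text, maxTextLength):
--     # Run-length view: a run of L equal chars costs 2*L - 1 (first char 1, repeats 2 each).
--     pos = 0
--     total = 0
--     for _, grp in groupby(text):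
--         L = sum(1 for _ in grp)
--         if total + 2 * L - 1 > maxTextLength:
--             # closed-form cut inside this run: smallest k with total + 1 + 2*k > maxTextLength
--             k = max(0, (maxTextLength - total + 1) // 2)
--             return (False, text[:pos + k])
--         total += 2 * L - 1
--         pos += L
--     return (True, text)
-- ===== Notes on version B (the rewrite author's own statement) =====
-- stated objective: alternative
-- what changed: B works on the run-length decomposition of the text: each maximal run of L equal characters costs 2*L-1, and when a run first pushes the total over maxTextLength the cut index inside the run is computed by a closed arithmetic formula instead of A's per-character accumulate-and-test loop.
import Mathlib
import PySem

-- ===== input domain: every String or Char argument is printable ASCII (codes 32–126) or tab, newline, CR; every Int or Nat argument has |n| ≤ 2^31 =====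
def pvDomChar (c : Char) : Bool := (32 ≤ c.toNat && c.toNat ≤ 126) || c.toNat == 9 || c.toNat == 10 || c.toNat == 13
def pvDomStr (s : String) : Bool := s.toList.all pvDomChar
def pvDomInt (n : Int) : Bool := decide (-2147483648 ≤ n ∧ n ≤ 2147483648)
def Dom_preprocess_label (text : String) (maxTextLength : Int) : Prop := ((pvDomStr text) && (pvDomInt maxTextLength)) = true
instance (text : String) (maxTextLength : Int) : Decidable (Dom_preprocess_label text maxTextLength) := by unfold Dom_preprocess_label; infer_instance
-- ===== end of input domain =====

-- B replaces A's per-character accumulate-and-test loop by a run-length decomposition with a closed-form cut index per run (alternative algorithm, same cost). 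


-- ===== PORT A =====
-- A's for-loop over indices, carried as a recursion over the remaining characters with
-- the previous character (text[i-1]; none at i = 0), the index i and the accumulator cost;
-- text[:i] with i ≥ 0 is full.take i (exact).
def pvA_go (full : List Char) (m : Int) : List Char → Option Char → Nat → Int → Bool × String
  | [], _, _, _ => (true, String.ofList full)
  | c :: rest, prev, i, cost =>
    let cost' := cost + (if prev = some c then 2 else 1)
    if m < cost' then (false, String.ofList (full.take i))
    else pvA_go full m rest (some c) (i + 1) cost'

def preprocess_label (text : String) (maxTextLength : Int) : Bool × String :=
  pvA_go text.toList maxTextLength text.toList none 0 0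

-- ===== PORT B =====
-- B's loop over the maximal runs of equal characters (itertools.groupby): the run of the
-- head char c has length L = 1 + length of the leading chars of rest equal to c; a run
-- costs 2*L - 1; on overflow the cut k = max(0, (m - total + 1) // 2) is Python floor
-- division, PySem.Int.floordiv (exact).
def pvB_go (full : List Char) (m : Int) : List Char → Nat → Int → Bool × String
  | [], _, _ => (true, String.ofList full)
  | c :: rest, pos, total =>
    let L : Nat := 1 + (rest.takeWhile (· = c)).length
    if m < total + 2 * (L : Int) - 1 then
      (false, String.ofList (full.take (pos + (max 0 (PySem.Int.floordiv (m - total + 1) 2)).toNat)))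
    else pvB_go full m (rest.dropWhile (· = c)) (pos + L) (total + 2 * (L : Int) - 1)
  termination_by cs => cs.length
  decreasing_by
    have := List.length_dropWhile_le (p := (· = c)) (l := rest)
    simp; omega

def preprocess_label_alt (text : String) (maxTextLength : Int) : Bool × String :=
  pvB_go text.toList maxTextLength text.toList 0 0

-- ===== PRECONDITION & SPEC =====
def Spec_preprocess_label (text : String) (maxTextLength : Int) (out : Bool × String) : Prop := out = preprocess_label_alt text maxTextLength
instance (text : String) (maxTextLength : Int) (out : Bool × String) : Decidable (Spec_preprocess_label text maxTextLength out) := by unfold Spec_preprocess_label; infer_instance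

-- ===== CLAIM (what is proved, stated in full; the proofs are below) =====
def Claim_equal_preprocess_label : Prop := ∀ (text : String) (maxTextLength : Int), Dom_preprocess_label text maxTextLength → Spec_preprocess_label text maxTextLength (preprocess_label text maxTextLength)

-- ===== LEMMAS AND PROOFS =====

-- consuming the all-equal tail t of a run (prev = some c, every char of t equals c):
-- A's loop either cuts inside t (each char costs 2) or leaves t with cost + 2*|t|.
-- Python // 2 is Int ediv for a positive divisor
theorem pv_fd2 (a : Int) : PySem.Int.floordiv a 2 = a / 2 :=
  PySem.Int.floordiv_eq_ediv_of_pos (by omega)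

-- consuming the all-equal tail t of a run (prev = some c, every char of t equals c, the
-- loop has not yet overflowed): A's loop either cuts inside t (each char costs 2) or
-- leaves t with cost + 2*|t|.
theorem pvA_run_tail (full : List Char) (m : Int) (c : Char) :
    ∀ (t rest2 : List Char), (∀ x ∈ t, x = c) → ∀ (i : Nat) (cost : Int), cost ≤ m →
      pvA_go full m (t ++ rest2) (some c) i cost =
        if m < cost + 2 * (t.length : Int) then
          (false, String.ofList (full.take (i + (max 0 (PySem.Int.floordiv (m - cost) 2)).toNat)))
        else pvA_go full m rest2 (some c) (i + t.length) (cost + 2 * (t.length : Int)) := by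
  intro t
  induction t with
  | nil =>
    intro rest2 _ i cost hcm
    simp only [List.nil_append, List.length_nil]
    rw [if_neg (by push_cast; omega)]
    simp
  | cons x t ih =>
    intro rest2 hall i cost hcm
    have hx : x = c := hall x (List.mem_cons_self)
    subst hx
    have hstep : pvA_go full m ((x :: t) ++ rest2) (some x) i cost =
        (if m < cost + 2 then (false, String.ofList (full.take i))
         else pvA_go full m (t ++ rest2) (some x) (i + 1) (cost + 2)) := by
      simp [pvA_go]
    rw [hstep]
    by_cases h : m < cost + 2
    · rw [if_pos h]
      have hlt : m < cost + 2 * ((x :: t).length : Int) := by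
        simp only [List.length_cons]; push_cast; omega
      rw [if_pos hlt]
      have hz : (max 0 (PySem.Int.floordiv (m - cost) 2)).toNat = 0 := by
        rw [pv_fd2]; omega
      rw [hz]; simp
    · rw [if_neg h]
      rw [ih rest2 (fun y hy => hall y (List.mem_cons_of_mem _ hy)) (i + 1) (cost + 2) (by omega)]
      by_cases h2 : m < cost + 2 + 2 * (t.length : Int)
      · rw [if_pos h2]
        have hlt : m < cost + 2 * ((x :: t).length : Int) := by
          simp only [List.length_cons]; push_cast; omega
        rw [if_pos hlt]
        have hidx : i + 1 + (max 0 (PySem.Int.floordiv (m - (cost + 2)) 2)).toNat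
            = i + (max 0 (PySem.Int.floordiv (m - cost) 2)).toNat := by
          rw [pv_fd2, pv_fd2]; omega
        rw [hidx]
      · rw [if_neg h2]
        have hge : ¬ m < cost + 2 * ((x :: t).length : Int) := by
          simp only [List.length_cons]; push_cast; omega
        rw [if_neg hge]
        congr 1
        · simp [List.length_cons]; omega
        · simp only [List.length_cons]; push_cast; ring

-- main loop correspondence: at a run boundary (prev differs from the head char),
-- A's per-character loop equals B's per-run loop.
theorem pvAB_go (full : List Char) (m : Int) :
    ∀ (n : Nat) (cs : List Char), cs.length ≤ n → ∀ (prev : Option Char) (i : Nat) (cost : Int),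
      (∀ c rest, cs = c :: rest → prev ≠ some c) →
      pvA_go full m cs prev i cost = pvB_go full m cs i cost := by
  intro n
  induction n with
  | zero =>
    intro cs hn prev i cost _
    have : cs = [] := List.length_eq_zero_iff.mp (by omega)
    subst this; simp [pvA_go, pvB_go]
  | succ n ih =>
    intro cs hn prev i cost hb
    match cs with
    | [] => simp [pvA_go, pvB_go]
    | c :: rest =>
      have hprev : prev ≠ some c := hb c rest rfl
      have hsplit : rest = rest.takeWhile (· = c) ++ rest.dropWhile (· = c) :=
        (List.takeWhile_append_dropWhile).symm
      have hA : pvA_go full m (c :: rest) prev i cost =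
          (if m < cost + 1 then (false, String.ofList (full.take i))
           else pvA_go full m rest (some c) (i + 1) (cost + 1)) := by
        simp [pvA_go, hprev]
      rw [hA]
      set t := rest.takeWhile (· = c) with ht
      set r2 := rest.dropWhile (· = c) with hr2
      by_cases h1 : m < cost + 1
      · rw [if_pos h1]
        simp only [pvB_go]
        have hlen : m < cost + 2 * ((1 + t.length : Nat) : Int) - 1 := by push_cast; omega
        rw [if_pos hlen]
        have hz : (max 0 (PySem.Int.floordiv (m - cost + 1) 2)).toNat = 0 := by
          rw [pv_fd2]; omega
        rw [hz]; simp
      · rw [if_neg h1]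
        conv_lhs => rw [hsplit]
        rw [pvA_run_tail full m c t r2 (fun x hx => by
              have := List.mem_takeWhile_imp hx
              exact of_decide_eq_true this) (i + 1) (cost + 1) (by omega)]
        simp only [pvB_go]
        by_cases h2 : m < cost + 1 + 2 * (t.length : Int)
        · rw [if_pos h2]
          have hlen : m < cost + 2 * ((1 + t.length : Nat) : Int) - 1 := by push_cast; omega
          rw [if_pos hlen]
          have hidx : i + 1 + (max 0 (PySem.Int.floordiv (m - (cost + 1)) 2)).toNat
              = i + (max 0 (PySem.Int.floordiv (m - cost + 1) 2)).toNat := by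
            rw [pv_fd2, pv_fd2]; omega
          rw [hidx]
        · rw [if_neg h2]
          have hlen : ¬ m < cost + 2 * ((1 + t.length : Nat) : Int) - 1 := by push_cast; omega
          rw [if_neg hlen]
          have hcost : cost + 1 + 2 * (t.length : Int) = cost + 2 * ((1 + t.length : Nat) : Int) - 1 := by
            push_cast; ring
          have hidx : i + 1 + t.length = i + (1 + t.length) := by omega
          rw [hcost, hidx]
          apply ih
          · have hlt : r2.length ≤ rest.length := by
              rw [hr2]; exact List.length_dropWhile_le _ _
            simp only [List.length_cons] at hn
            omega
          · intro c' rest' hr hcc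
            have hcc' : c = c' := by injection hcc
            subst hcc'
            have := List.head?_dropWhile_not (p := fun x => decide (x = c)) (l := rest)
            rw [← hr2, hr] at this
            simp at this

-- ===== VERDICT (by name: the statement is the Claim_ definition above) =====
theorem preprocess_label_spec : Claim_equal_preprocess_label := by
  intro text m _
  unfold Spec_preprocess_label preprocess_label preprocess_label_alt
  exact pvAB_go text.toList m text.toList.length text.toList (le_refl _) none 0 0 (fun _ _ _ => by simp)
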